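-- pv_equiv track=rewrite | github.com/Charan-Pedumuru/coding | Python language/GNU/Plot.py | viterbi_encoder
-- ===== SOURCE A (Python) =====
-- def v_xor(bit0, bit1):
--     if bit0 == bit1:
--         return 0
--     else:
--         return 1
--
-- def viterbi_encoder(inputs):
--     s_reg = [0, 0, 0, 0, 0, 0, 0]
--     encoded_output = []
--
--     for t in range(0, len(inputs)):
--         s_reg[6] = s_reg[5]
--         s_reg[5] = s_reg[4]
--         s_reg[4] = s_reg[3]
--         s_reg[3] = s_reg[2]
--         s_reg[2] = s_reg[1]
--         s_reg[1] = s_reg[0]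
--
--         s_reg[0] = inputs[t] # Ensure inputs are treated as integers
--
--         output1 = v_xor(v_xor(v_xor(v_xor(s_reg[0], s_reg[1]), s_reg[2]), s_reg[3]), s_reg[6])
--         output2 = v_xor(v_xor(v_xor(v_xor(s_reg[0], s_reg[2]), s_reg[3]), s_reg[5]), s_reg[6])
--         encoded_output.append(output1)
--         encoded_output.append(output2)
--
--     return encoded_output
-- ===== SOURCE B (Python) =====
-- def v_xor(bit0, bit1):
--     if bit0 == bit1:
--         return 0
--     else:
--         return 1
--
-- def viterbi_encoder(inputs):
--     # Dataflow formulation: pad the stream once, slice out the delayed copies,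
--     # compute each output stream wholesale by zipping, then interleave them.
--     n = len(inputs)
--     ext = [0] * 6 + inputs          # ext[t + 6 - k] is register tap k at time t
--     s0 = ext[6:]
--     s1 = ext[5:5 + n]
--     s2 = ext[4:4 + n]
--     s3 = ext[3:3 + n]
--     s5 = ext[1:1 + n]
--     s6 = ext[0:n]
--     out1 = [v_xor(v_xor(v_xor(v_xor(a, b), c), d), g)
--             for a, b, c, d, g in zip(s0, s1, s2, s3, s6)]
--     out2 = [v_xor(v_xor(v_xor(v_xor(a, c), d), f), g)
--             for a, c, d, f, g in zip(s0, s2, s3, s5, s6)]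
--     encoded_output = []
--     for x, y in zip(out1, out2):
--         encoded_output.append(x)
--         encoded_output.append(y)
--     return encoded_output
-- ===== Notes on version B (the rewrite author's own statement) =====
-- stated objective: alternative
-- what changed: Replaces the stateful per-step 7-cell shift register with a staged dataflow pipeline: zero-pad the stream once, slice out the delayed copies, compute the two output streams wholesale by zipping, then interleave them.
import Mathlib
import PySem

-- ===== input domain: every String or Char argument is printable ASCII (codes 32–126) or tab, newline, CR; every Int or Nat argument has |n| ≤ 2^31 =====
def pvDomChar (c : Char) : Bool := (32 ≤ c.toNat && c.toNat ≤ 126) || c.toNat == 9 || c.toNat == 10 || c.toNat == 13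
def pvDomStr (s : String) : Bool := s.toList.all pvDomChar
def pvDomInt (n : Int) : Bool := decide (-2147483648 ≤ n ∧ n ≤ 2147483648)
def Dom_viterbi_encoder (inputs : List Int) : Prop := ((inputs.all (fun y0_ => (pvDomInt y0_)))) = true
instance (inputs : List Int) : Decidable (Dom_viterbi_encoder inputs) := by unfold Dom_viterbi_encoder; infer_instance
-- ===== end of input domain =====

-- B replaces A's stateful shift-register loop with a staged dataflow pipeline
-- (pad once, slice delayed copies, zip into two output streams, interleave);
-- the return values are proved equal on all inputs.

-- ===== PORT A =====
def vxor (bit0 bit1 : Int) : Int := if bit0 == bit1 then 0 else 1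

-- A's loop: the 7-cell register is the tuple (r0,…,r6); each step performs A's six
-- cell moves, loads inputs[t] into r0, and appends the two v_xor chains.
def aLoop : List Int → Int × Int × Int × Int × Int × Int × Int → List Int
  | [], _ => []
  | x :: rest, (r0, r1, r2, r3, r4, _r5, _r6) =>
    let n6 := _r5
    let n5 := r4
    let n4 := r3
    let n3 := r2
    let n2 := r1
    let n1 := r0
    let n0 := x
    let output1 := vxor (vxor (vxor (vxor n0 n1) n2) n3) n6
    let output2 := vxor (vxor (vxor (vxor n0 n2) n3) n5) n6
    output1 :: output2 :: aLoop rest (n0, n1, n2, n3, n4, n5, n6)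

def viterbi_encoder (inputs : List Int) : List Int :=
  aLoop inputs (0, 0, 0, 0, 0, 0, 0)

-- ===== PORT B =====
-- Slices ext[a:a+n] are ported as (ext.drop a).take n, exact here since the
-- bounds are non-negative and within range; zip of five lists is ported as
-- nested List.zip; the interleaving loop as flatMap over the zipped pairs.
def viterbi_encoder_alt (inputs : List Int) : List Int :=
  let n := inputs.length
  let ext := List.replicate 6 0 ++ inputs
  let s0 := ext.drop 6
  let s1 := (ext.drop 5).take n
  let s2 := (ext.drop 4).take n
  let s3 := (ext.drop 3).take n
  let s5 := (ext.drop 1).take n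
  let s6 := ext.take n
  let out1 := (s0.zip (s1.zip (s2.zip (s3.zip s6)))).map
    (fun (p : Int × Int × Int × Int × Int) =>
      vxor (vxor (vxor (vxor p.1 p.2.1) p.2.2.1) p.2.2.2.1) p.2.2.2.2)
  let out2 := (s0.zip (s2.zip (s3.zip (s5.zip s6)))).map
    (fun (p : Int × Int × Int × Int × Int) =>
      vxor (vxor (vxor (vxor p.1 p.2.1) p.2.2.1) p.2.2.2.1) p.2.2.2.2)
  (out1.zip out2).flatMap (fun (p : Int × Int) => [p.1, p.2])

-- ===== PRECONDITION & SPEC =====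
def Spec_viterbi_encoder (inputs : List Int) (out : List Int) : Prop := out = viterbi_encoder_alt inputs
instance (inputs : List Int) (out : List Int) : Decidable (Spec_viterbi_encoder inputs out) := by unfold Spec_viterbi_encoder; infer_instance

-- ===== CLAIM =====
def Claim_equal_viterbi_encoder : Prop := ∀ (inputs : List Int), Dom_viterbi_encoder inputs → Spec_viterbi_encoder inputs (viterbi_encoder inputs)

-- ===== LEMMAS AND PROOFS =====

-- common recursive reference: state (a..f) = taps 1..6 of the coming step
def specF : List Int → Int → Int → Int → Int → Int → Int → List Int
  | [], _, _, _, _, _, _ => []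
  | x :: rest, a, b, c, d, e, f =>
    vxor (vxor (vxor (vxor x a) b) c) f ::
    vxor (vxor (vxor (vxor x b) c) e) f ::
    specF rest x a b c d e

-- B's pipeline with the six pad cells made explicit
def bCore (z0 z1 z2 z3 z4 z5 : Int) (rest : List Int) : List Int :=
  let n := rest.length
  let ext := z0 :: z1 :: z2 :: z3 :: z4 :: z5 :: rest
  let s0 := ext.drop 6
  let s1 := (ext.drop 5).take n
  let s2 := (ext.drop 4).take n
  let s3 := (ext.drop 3).take n
  let s5 := (ext.drop 1).take n
  let s6 := ext.take n
  let out1 := (s0.zip (s1.zip (s2.zip (s3.zip s6)))).map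
    (fun (p : Int × Int × Int × Int × Int) =>
      vxor (vxor (vxor (vxor p.1 p.2.1) p.2.2.1) p.2.2.2.1) p.2.2.2.2)
  let out2 := (s0.zip (s2.zip (s3.zip (s5.zip s6)))).map
    (fun (p : Int × Int × Int × Int × Int) =>
      vxor (vxor (vxor (vxor p.1 p.2.1) p.2.2.1) p.2.2.2.1) p.2.2.2.2)
  (out1.zip out2).flatMap (fun (p : Int × Int) => [p.1, p.2])

theorem aLoop_eq_specF (rest : List Int) :
    ∀ a b c d e f g, aLoop rest (a, b, c, d, e, f, g) = specF rest a b c d e f := by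
  induction rest with
  | nil => intro a b c d e f g; rfl
  | cons x rest ih => intro a b c d e f g; simp [aLoop, specF, ih]

theorem bCore_eq_specF (rest : List Int) :
    ∀ z0 z1 z2 z3 z4 z5, bCore z0 z1 z2 z3 z4 z5 rest = specF rest z5 z4 z3 z2 z1 z0 := by
  induction rest with
  | nil => intro z0 z1 z2 z3 z4 z5; rfl
  | cons x rest ih =>
    intro z0 z1 z2 z3 z4 z5
    have h := ih z1 z2 z3 z4 z5 x
    simp only [bCore, List.length_cons, List.drop, List.take_succ_cons, List.zip_cons_cons,
      List.map_cons, List.flatMap_cons, specF] at h ⊢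
    simp [h]

theorem alt_eq_bCore (inputs : List Int) :
    viterbi_encoder_alt inputs = bCore 0 0 0 0 0 0 inputs := by
  rfl

-- ===== VERDICT =====
theorem viterbi_encoder_spec : Claim_equal_viterbi_encoder := by
  intro inputs _
  unfold Spec_viterbi_encoder viterbi_encoder
  rw [alt_eq_bCore, bCore_eq_specF, aLoop_eq_specF]
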